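-- pv_equiv track=rewrite | github.com/CarlosArH/Python | Fud_programación/ejercicio8_C4.py | son_iguales
-- ===== SOURCE A (Python) =====
-- def son_iguales(frase1, frase2):
--     iguales = True
--     if len(frase1) != len(frase2):
--         iguales = False
--     caracter= 0
--     while iguales and caracter < len(frase1):
--         if frase1[caracter] == frase2[caracter]:
--             caracter += 1
--         else:
--             iguales = False
--     return iguales
-- ===== SOURCE B (Python) =====
-- def son_iguales(frase1, frase2):
--     return frase1 == frase2
-- ===== Notes on version B (the rewrite author's own statement) =====
-- stated objective: simpler
-- what changed: Replaces the manual length check, flag variable and indexed while-loop with a single built-in sequence equality `frase1 == frase2`.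
import Mathlib
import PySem

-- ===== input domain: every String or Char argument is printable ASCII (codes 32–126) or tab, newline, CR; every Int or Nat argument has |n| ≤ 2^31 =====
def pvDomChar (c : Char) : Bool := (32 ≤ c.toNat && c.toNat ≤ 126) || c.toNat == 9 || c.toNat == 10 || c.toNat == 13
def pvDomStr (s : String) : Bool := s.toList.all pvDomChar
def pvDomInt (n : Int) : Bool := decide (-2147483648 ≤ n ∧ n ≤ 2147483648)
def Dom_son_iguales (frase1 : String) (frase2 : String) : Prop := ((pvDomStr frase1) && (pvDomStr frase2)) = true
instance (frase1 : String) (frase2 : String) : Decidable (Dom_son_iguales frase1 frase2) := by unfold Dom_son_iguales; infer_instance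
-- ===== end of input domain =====

-- B replaces A's manual length check, flag and indexed while-loop with built-in string equality (simpler).


-- ===== PORT A =====
-- the while-loop: state is (iguales = true, caracter = c); iguales = false exits by returning false.
-- frase1[caracter] == frase2[caracter] is compared as Option Char equality; the loop only runs while
-- c < len(frase1) and (since iguales is true) lengths are equal, so both indices are in range and
-- this equals Python's in-range character comparison exactly.
def sonIgualesLoop (l1 l2 : List Char) (c : Nat) : Bool :=
  if _h : c < l1.length then
    if l1[c]? == l2[c]? then sonIgualesLoop l1 l2 (c + 1) else false
  else true
termination_by l1.length - c

def son_iguales (frase1 : String) (frase2 : String) : Bool :=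
  let l1 := frase1.toList
  let l2 := frase2.toList
  if l1.length ≠ l2.length then false
  else sonIgualesLoop l1 l2 0

-- ===== PORT B =====
def son_iguales_alt (frase1 : String) (frase2 : String) : Bool :=
  frase1 == frase2

-- ===== PRECONDITION & SPEC =====
def Spec_son_iguales (frase1 : String) (frase2 : String) (out : Bool) : Prop := out = son_iguales_alt frase1 frase2
instance (frase1 : String) (frase2 : String) (out : Bool) : Decidable (Spec_son_iguales frase1 frase2 out) := by unfold Spec_son_iguales; infer_instance

-- ===== CLAIM (what is proved, stated in full; the proofs are below) =====
def Claim_equal_son_iguales : Prop := ∀ (frase1 : String) (frase2 : String), Dom_son_iguales frase1 frase2 → Spec_son_iguales frase1 frase2 (son_iguales frase1 frase2)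

-- ===== LEMMAS AND PROOFS =====

-- With equal lengths, the loop from index c decides equality of the suffixes from c.
theorem sonIgualesLoop_eq (l1 l2 : List Char) (hl : l1.length = l2.length) (c : Nat) :
    sonIgualesLoop l1 l2 c = (l1.drop c == l2.drop c) := by
  fun_induction sonIgualesLoop l1 l2 c with
  | case1 c h heq ih =>
      have h2 : c < l2.length := hl ▸ h
      have heq' : l1[c] = l2[c] := by
        simpa [List.getElem?_eq_getElem, h, h2] using heq
      rw [ih, List.drop_eq_getElem_cons h, List.drop_eq_getElem_cons h2, heq']
      simp only [List.cons_beq_cons, beq_self_eq_true, Bool.true_and]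
  | case2 c h heq =>
      have h2 : c < l2.length := hl ▸ h
      have hne : l1[c] ≠ l2[c] := by
        intro he
        exact heq (by simp [h, h2, he])
      have hd : List.drop c l1 ≠ List.drop c l2 := by
        intro he
        rw [List.drop_eq_getElem_cons h, List.drop_eq_getElem_cons h2] at he
        simp only [List.cons.injEq] at he
        exact hne he.1
      exact (beq_false_of_ne hd).symm
  | case3 c h =>
      have : l1.length ≤ c := Nat.le_of_not_lt h
      rw [List.drop_eq_nil_of_le this, List.drop_eq_nil_of_le (hl ▸ this)]
      rfl

-- ===== VERDICT (by name: the statement is the Claim_ definition above) =====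
theorem son_iguales_spec : Claim_equal_son_iguales := by
  intro f1 f2 _
  unfold Spec_son_iguales son_iguales son_iguales_alt
  simp only []
  by_cases hl : f1.toList.length = f2.toList.length
  · rw [if_neg (by simpa using hl), sonIgualesLoop_eq _ _ hl 0]
    simp only [List.drop_zero]
    rw [Bool.eq_iff_iff, beq_iff_eq, beq_iff_eq]
    exact String.toList_inj
  · rw [if_pos (by simpa using hl)]
    have : f1 ≠ f2 := by
      intro he; exact hl (by rw [he])
    simp [this]
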